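-- pv_equiv track=rewrite | github.com/ChenApr/Jedusa | data_generation/create_data_fast.py | pick_single_user_turn
-- ===== SOURCE A (Python) =====
-- def pick_single_user_turn(messages, pick: str):
--     """
--     messages: ChatML list (role=user/assistant)
--     return: (history_messages, target_user_message)
--     为了快：只取一个 user turn 来生成一次 assistant。
--     """
--     user_idxs = [i for i, m in enumerate(messages) if m["role"] == "user"]
--     if not user_idxs:
--         return [], None
--
--     if pick == "first":
--         idx = user_idxs[0]
--     elif pick == "last":
--         idx = user_idxs[-1]
--     else:
--         idx = user_idxs[0]
--
--     history = messages[:idx]   # 可为空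
--     user_msg = messages[idx]
--     return history, user_msg
-- ===== SOURCE B (Python) =====
-- def pick_single_user_turn(messages, pick: str):
--     # Directed short-circuit scan: no index table is built.
--     if pick == "last":
--         for i in range(len(messages) - 1, -1, -1):
--             if messages[i]["role"] == "user":
--                 return messages[:i], messages[i]
--     else:
--         history = []
--         for m in messages:
--             if m["role"] == "user":
--                 return history, m
--             history.append(m)
--     return [], None
-- ===== Notes on version B (the rewrite author's own statement) =====
-- stated objective: alternative
-- what changed: Replaces building the full list of user-message indices and selecting its first/last element by a directed short-circuit scan: backwards from the end for pick=='last', forwards (accumulating the history prefix) otherwise, returning at the first user message found.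
import Mathlib
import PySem

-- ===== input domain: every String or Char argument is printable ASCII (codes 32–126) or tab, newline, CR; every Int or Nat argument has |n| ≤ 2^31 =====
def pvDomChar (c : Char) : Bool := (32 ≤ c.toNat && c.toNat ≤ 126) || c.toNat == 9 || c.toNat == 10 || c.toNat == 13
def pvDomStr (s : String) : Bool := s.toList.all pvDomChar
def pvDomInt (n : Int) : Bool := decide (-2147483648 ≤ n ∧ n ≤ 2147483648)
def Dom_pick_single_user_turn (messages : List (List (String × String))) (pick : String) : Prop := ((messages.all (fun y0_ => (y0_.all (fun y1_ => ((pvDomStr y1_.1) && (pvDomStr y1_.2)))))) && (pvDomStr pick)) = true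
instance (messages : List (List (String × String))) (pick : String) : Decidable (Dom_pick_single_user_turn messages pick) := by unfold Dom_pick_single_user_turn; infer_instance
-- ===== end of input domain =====

-- B replaces A's index-table-then-select by a directed short-circuit scan (backwards for pick=="last", forwards otherwise); alternative decomposition, same cost.

-- ===== PORT A =====
-- m["role"] on a dict-as-association-list: first match; Pre_ guarantees the key is present.
def roleIsUser (m : List (String × String)) : Bool :=
  ((m.find? (fun p => p.1 == "role")).map (·.2)) == some "user"

def pick_single_user_turn (messages : List (List (String × String))) (pick : String) : (List (List (String × String))) × (Option (List (String × String))) :=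
  let user_idxs : List Int := ((PySem.List.enumerate messages).filter (fun p => roleIsUser p.2)).map (·.1)
  if user_idxs = [] then ([], none)
  else
    let idx : Int :=
      if pick == "first" then (PySem.List.pyGet? user_idxs 0).getD 0
      else if pick == "last" then (PySem.List.pyGet? user_idxs (-1)).getD 0
      else (PySem.List.pyGet? user_idxs 0).getD 0
    (PySem.List.slice messages none (some idx), PySem.List.pyGet? messages idx)

-- ===== PORT B =====
-- backwards scan of Source B's 'last' branch: fuel n+1 means "next index to test is n";
-- getD/take/getElem? are exact because the scanned index is in range by construction.
def altDown (messages : List (List (String × String))) : Nat → (List (List (String × String))) × (Option (List (String × String)))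
  | 0 => ([], none)
  | n + 1 =>
    if roleIsUser (messages.getD n []) then (messages.take n, messages[n]?)
    else altDown messages n

-- forwards scan of Source B's else-branch, carrying the 'history' accumulator.
def altUp (hist : List (List (String × String))) : List (List (String × String)) → (List (List (String × String))) × (Option (List (String × String)))
  | [] => ([], none)
  | m :: rest => if roleIsUser m then (hist, some m) else altUp (hist ++ [m]) rest

def pick_single_user_turn_alt (messages : List (List (String × String))) (pick : String) : (List (List (String × String))) × (Option (List (String × String))) :=
  if pick == "last" then altDown messages messages.length
  else altUp [] messages

-- ===== PRECONDITION & SPEC =====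
-- Pre_: every message carries a "role" key; otherwise Python A raises KeyError.
def Pre_pick_single_user_turn (messages : List (List (String × String))) (pick : String) : Prop :=
  ∀ m ∈ messages, (m.find? (fun p => p.1 == "role")).isSome = true

instance (messages : List (List (String × String))) (pick : String) : Decidable (Pre_pick_single_user_turn messages pick) := by unfold Pre_pick_single_user_turn; infer_instance

def pvWitness_pick_single_user_turn : (List (List (String × String))) × String :=
  ([[("role", "assistant"), ("content", "hi")], [("role", "user"), ("content", "q")]], "last")

def Spec_pick_single_user_turn (messages : List (List (String × String))) (pick : String) (out : (List (List (String × String))) × (Option (List (String × String)))) : Prop := out = pick_single_user_turn_alt messages pick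
instance (messages : List (List (String × String))) (pick : String) (out : (List (List (String × String))) × (Option (List (String × String)))) : Decidable (Spec_pick_single_user_turn messages pick out) := by unfold Spec_pick_single_user_turn; infer_instance

-- ===== CLAIM (what is proved, stated in full; the proofs are below) =====
def Claim_equal_pick_single_user_turn : Prop := ∀ (messages : List (List (String × String))) (pick : String), Dom_pick_single_user_turn messages pick → Pre_pick_single_user_turn messages pick → Spec_pick_single_user_turn messages pick (pick_single_user_turn messages pick)

-- ===== LEMMAS AND PROOFS =====

-- user-index list of A, with explicit enumerate start
def K (msgs : List (List (String × String))) (s : Int) : List Int :=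
  ((PySem.List.enumerate msgs s).filter (fun p => roleIsUser p.2)).map (·.1)

theorem K_nil (s : Int) : K [] s = [] := by simp [K, PySem.List.enumerate]

theorem K_cons (m : List (String × String)) (rest : List (List (String × String))) (s : Int) :
    K (m :: rest) s = if roleIsUser m then s :: K rest (s + 1) else K rest (s + 1) := by
  simp only [K, PySem.List.enumerate_cons, List.filter_cons]
  split_ifs with h <;> simp [h]

theorem K_mem_bounds {msgs : List (List (String × String))} {s i : Int} (h : i ∈ K msgs s) :
    s ≤ i ∧ i < s + msgs.length := by
  simp only [K, List.mem_map, List.mem_filter] at h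
  obtain ⟨p, ⟨hp, _⟩, rfl⟩ := h
  rw [PySem.List.mem_enumerate_iff] at hp
  obtain ⟨k, hk, rfl⟩ := hp
  constructor <;> simp <;> omega

theorem fwd (msgs : List (List (String × String))) : ∀ (s : Int) (acc : List (List (String × String))),
    (match K msgs s with
     | [] => ([], none)
     | i :: _ => (acc ++ PySem.List.slice msgs none (some (i - s)), PySem.List.pyGet? msgs (i - s)))
    = altUp acc msgs := by
  induction msgs with
  | nil => intro s acc; simp [K_nil, altUp]
  | cons m rest ih =>
    intro s acc
    rw [K_cons]
    by_cases h : roleIsUser m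
    · simp only [h, if_true, altUp]
      have : s - s = 0 := by omega
      simp [this, PySem.List.slice, PySem.List.pyGet?, PySem.List.pyIdx?, h]
    · simp only [h, if_false, altUp, Bool.false_eq_true]
      have := ih (s + 1) (acc ++ [m])
      rw [← this]
      cases hK : K rest (s + 1) with
      | nil => rfl
      | cons i tl =>
        have hb : s + 1 ≤ i := (K_mem_bounds (by rw [hK]; exact List.mem_cons_self)).1
        dsimp only
        obtain ⟨n, hn⟩ : ∃ n : Nat, i - s = ((n : Int) + 1) := ⟨(i - s).toNat - 1, by omega⟩
        have h2 : (i - (s + 1)) = ((n : Nat) : Int) := by omega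
        rw [hn, h2]
        rw [show ((n : Int) + 1) = (((n + 1 : Nat)) : Int) by push_cast; ring]
        simp only [PySem.List.slice_to_natCast, PySem.List.pyGet?_natCast, List.take_succ_cons,
          List.getElem?_cons_succ, List.append_assoc, List.singleton_append]

theorem altDown_append (xs : List (List (String × String))) (m : List (String × String)) :
    ∀ n, n ≤ xs.length → altDown (xs ++ [m]) n = altDown xs n := by
  intro n
  induction n with
  | zero => intro _; rfl
  | succ k ih =>
    intro hk
    have hk' : k < xs.length := by omega
    simp only [altDown, List.getD, List.getElem?_append_left hk', ih (by omega),
      List.take_append_of_le_length (by omega : k ≤ xs.length)]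
    rfl

theorem bwd (msgs : List (List (String × String))) :
    (match (K msgs 0).getLast? with
     | none => ([], none)
     | some i => (PySem.List.slice msgs none (some i), PySem.List.pyGet? msgs i))
    = altDown msgs msgs.length := by
  induction msgs using List.reverseRecOn with
  | nil => simp [K_nil, altDown]
  | append_singleton xs m ih =>
    have hK : K (xs ++ [m]) 0 = K xs 0 ++ (if roleIsUser m then [(xs.length : Int)] else []) := by
      simp only [K, PySem.List.enumerate_append, List.filter_append, List.map_append]
      congr 1
      simp only [PySem.List.enumerate_cons, PySem.List.enumerate_nil, List.filter_cons]
      split_ifs with h <;> simp [h]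
    have hlen : (xs ++ [m]).length = xs.length + 1 := by simp
    rw [hlen]
    by_cases h : roleIsUser m
    · simp only [hK, h, if_true, List.getLast?_concat, altDown]
      have hg : (xs ++ [m]).getD xs.length [] = m := by
        simp [List.getD, List.getElem?_append_right (le_refl xs.length)]
      rw [hg, if_pos h]
      simp [PySem.List.slice_to_natCast, PySem.List.pyGet?_natCast,
        List.take_append_of_le_length (le_refl xs.length),
        List.getElem?_append_right (le_refl xs.length)]
    · simp only [hK, h, if_false, List.append_nil, Bool.false_eq_true]
      have hg : (xs ++ [m]).getD xs.length [] = m := by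
        simp [List.getD, List.getElem?_append_right (le_refl xs.length)]
      simp only [altDown, hg, h, if_false, Bool.false_eq_true]
      rw [altDown_append xs m xs.length (le_refl _), ← ih]
      cases hK0 : (K xs 0).getLast? with
      | none => rfl
      | some i =>
        have hmem : i ∈ K xs 0 := List.mem_of_getLast? hK0
        have hb := K_mem_bounds hmem
        have h1 : i = ((i.toNat : Nat) : Int) := by omega
        have h2 : i.toNat < xs.length := by omega
        rw [h1]
        simp only [PySem.List.slice_to_natCast, PySem.List.pyGet?_natCast,
          List.take_append_of_le_length (by omega : i.toNat ≤ xs.length),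
          List.getElem?_append_left h2]

-- ===== VERDICT (by name: the statement is the Claim_ definition above) =====
theorem pick_single_user_turn_spec : Claim_equal_pick_single_user_turn := by
  intro messages pick _ _
  unfold Spec_pick_single_user_turn pick_single_user_turn pick_single_user_turn_alt
  simp only [show ((PySem.List.enumerate messages 0).filter (fun p => roleIsUser p.2)).map (·.1) = K messages 0 from rfl]
  by_cases hl : pick == "last"
  · -- last: A picks user_idxs[-1], B scans backwards
    rw [← bwd messages]
    simp only [hl, if_true]
    cases hK : K messages 0 with
    | nil => simp [hK]
    | cons i tl =>
      have hfirst : (pick == "first") = false := by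
        cases hpf : pick == "first"
        · rfl
        · exfalso; have := eq_of_beq hl; have := eq_of_beq hpf; simp_all
      simp only [hK, if_neg (by simp : ¬(i :: tl = [])), hfirst, hl, Bool.false_eq_true,
        if_false, if_true, PySem.List.pyGet?_neg_one]
      cases hgl : (i :: tl).getLast? with
      | none => simp at hgl
      | some j => simp
  · rw [← fwd messages 0 []]
    simp only [hl, Bool.false_eq_true, if_false]
    cases hK : K messages 0 with
    | nil => simp [hK]
    | cons i tl =>
      simp only [hK, if_neg (by simp : ¬(i :: tl = []))]
      by_cases hpf : pick == "first" <;>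
        simp [hpf, PySem.List.pyGet?_zero_cons, sub_zero]
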